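-- pv_equiv track=rewrite | github.com/fomoesc-git/SubAligner | engine/core/text_processor.py | get_sentence_boundaries
-- ===== SOURCE A (Python) =====
-- from typing import List, Tuple
--
-- def get_sentence_boundaries(sentences: List[str]) -> List[Tuple[int, int]]:
--     """
--     Get character position boundaries for each sentence in the full text.
--     Returns list of (start, end) tuples.
--     """
--     boundaries = []
--     pos = 0
--     for s in sentences:
--         length = len(s.replace(" ", ""))
--         boundaries.append((pos, pos + length))
--         pos += length
--     return boundaries
-- ===== SOURCE B (Python) =====
-- from typing import List, Tuple
--
-- def get_sentence_boundaries(sentences: List[str]) -> List[Tuple[int, int]]: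
--     """
--     Get character position boundaries for each sentence in the full text.
--     Returns list of (start, end) tuples.
--     """
--     lengths = [len(s.replace(" ", "")) for s in sentences]
--     ends = []
--     total = 0
--     for n in lengths:
--         total += n
--         ends.append(total)
--     starts = [0] + ends[:-1]
--     return list(zip(starts, ends))
-- ===== Notes on version B (the rewrite author's own statement) =====
-- stated objective: alternative
-- what changed: Replaces the single fused running-position loop that emits (pos, pos+len) pairs with a three-stage decomposition: materialize the space-free lengths, build the prefix-sum list of end positions, then zip the shifted starts with the ends.
import Mathlib
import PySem

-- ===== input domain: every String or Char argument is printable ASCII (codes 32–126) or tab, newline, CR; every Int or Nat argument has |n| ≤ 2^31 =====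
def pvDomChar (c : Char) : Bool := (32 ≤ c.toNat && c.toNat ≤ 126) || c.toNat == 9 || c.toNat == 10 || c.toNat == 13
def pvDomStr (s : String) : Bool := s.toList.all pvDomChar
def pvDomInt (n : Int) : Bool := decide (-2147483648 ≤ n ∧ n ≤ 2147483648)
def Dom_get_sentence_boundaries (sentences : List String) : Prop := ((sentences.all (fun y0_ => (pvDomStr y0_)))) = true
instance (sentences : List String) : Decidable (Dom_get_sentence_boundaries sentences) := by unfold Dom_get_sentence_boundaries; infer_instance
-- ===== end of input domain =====

-- B restructures A's single fused running-position loop into three stages: lengths, prefix-sum ends, zip with shifted starts. Same cost; objective: alternative decomposition.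

-- ===== PORT A =====
-- the for-loop over sentences, carrying (boundaries, pos)
def pvA_loop (sentences : List String) : List (Int × Int) × Int :=
  sentences.foldl
    (fun (st : List (Int × Int) × Int) s =>
      let length : Int := PySem.Str.len (PySem.Str.replace s " " "")
      (st.1 ++ [(st.2, st.2 + length)], st.2 + length))
    ([], 0)

def get_sentence_boundaries (sentences : List String) : List (Int × Int) :=
  (pvA_loop sentences).1

-- ===== PORT B =====
-- prefix-sum loop of Source B, carrying (ends, total)
def pvB_ends (lengths : List Int) : List Int :=
  (lengths.foldl (fun (st : List Int × Int) n => (st.1 ++ [st.2 + n], st.2 + n)) ([], 0)).1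

def get_sentence_boundaries_alt (sentences : List String) : List (Int × Int) :=
  let lengths : List Int := sentences.map (fun s => PySem.Str.len (PySem.Str.replace s " " ""))
  let ends : List Int := pvB_ends lengths
  let starts : List Int := 0 :: PySem.List.slice ends none (some (-1))  -- [0] + ends[:-1]
  starts.zip ends

-- ===== PRECONDITION & SPEC =====
def Spec_get_sentence_boundaries (sentences : List String) (out : List (Int × Int)) : Prop := out = get_sentence_boundaries_alt sentences
instance (sentences : List String) (out : List (Int × Int)) : Decidable (Spec_get_sentence_boundaries sentences out) := by unfold Spec_get_sentence_boundaries; infer_instance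

-- ===== CLAIM (what is proved, stated in full; the proofs are below) =====
def Claim_equal_get_sentence_boundaries : Prop := ∀ (sentences : List String), Dom_get_sentence_boundaries sentences → Spec_get_sentence_boundaries sentences (get_sentence_boundaries sentences)

-- ===== LEMMAS AND PROOFS =====

-- A's loop with accumulator: result and final pos, generalized over start state
theorem pvA_loop_general (sentences : List String) (acc : List (Int × Int)) (pos : Int) :
    sentences.foldl
      (fun (st : List (Int × Int) × Int) s =>
        let length : Int := PySem.Str.len (PySem.Str.replace s " " "")
        (st.1 ++ [(st.2, st.2 + length)], st.2 + length))
      (acc, pos)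
    = ((acc ++ (sentences.foldl
        (fun (st : List (Int × Int) × Int) s =>
          let length : Int := PySem.Str.len (PySem.Str.replace s " " "")
          (st.1 ++ [(st.2, st.2 + length)], st.2 + length))
        ([], pos)).1),
       (sentences.foldl
        (fun (st : List (Int × Int) × Int) s =>
          let length : Int := PySem.Str.len (PySem.Str.replace s " " "")
          (st.1 ++ [(st.2, st.2 + length)], st.2 + length))
        ([], pos)).2) := by
  induction sentences generalizing acc pos with
  | nil => simp
  | cons s rest ih =>
    simp only [List.foldl_cons]
    rw [ih, ih (([] : List (Int × Int)) ++ _)]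
    simp

theorem pvB_ends_general (lengths : List Int) (acc : List Int) (t : Int) :
    lengths.foldl (fun (st : List Int × Int) n => (st.1 ++ [st.2 + n], st.2 + n)) (acc, t)
    = ((acc ++ (lengths.foldl (fun (st : List Int × Int) n => (st.1 ++ [st.2 + n], st.2 + n)) ([], t)).1),
       (lengths.foldl (fun (st : List Int × Int) n => (st.1 ++ [st.2 + n], st.2 + n)) ([], t)).2) := by
  induction lengths generalizing acc t with
  | nil => simp
  | cons n rest ih =>
    simp only [List.foldl_cons]
    rw [ih, ih (([] : List Int) ++ _)]
    simp

-- generalized core: A's loop from pos equals zip of (pos :: shifted ends) with ends-from-pos,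
-- where endsFrom pos l is the prefix-sum list starting at pos
def pvEndsFrom (pos : Int) : List String → List Int
  | [] => []
  | s :: rest =>
      let e := pos + PySem.Str.len (PySem.Str.replace s " " "")
      e :: pvEndsFrom e rest

theorem pvB_ends_eq_endsFrom (sentences : List String) (t : Int) :
    (sentences.map (fun s => PySem.Str.len (PySem.Str.replace s " " ""))).foldl
      (fun (st : List Int × Int) n => (st.1 ++ [st.2 + n], st.2 + n)) ([], t)
    = (pvEndsFrom t sentences, ((pvEndsFrom t sentences).getLast?).getD t) := by
  induction sentences generalizing t with
  | nil => simp [pvEndsFrom]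
  | cons s rest ih =>
    simp only [List.map_cons, List.foldl_cons]
    rw [pvB_ends_general, ih]
    simp [pvEndsFrom]
    cases h : pvEndsFrom (t + PySem.Str.len (PySem.Str.replace s " " "")) rest <;>
      simp [List.getLast?_cons]

theorem pvA_eq_zip (sentences : List String) (pos : Int) :
    (sentences.foldl
      (fun (st : List (Int × Int) × Int) s =>
        let length : Int := PySem.Str.len (PySem.Str.replace s " " "")
        (st.1 ++ [(st.2, st.2 + length)], st.2 + length))
      ([], pos)).1
    = (pos :: (pvEndsFrom pos sentences).dropLast).zip (pvEndsFrom pos sentences) := by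
  induction sentences generalizing pos with
  | nil => simp [pvEndsFrom]
  | cons s rest ih =>
    simp only [List.foldl_cons]
    rw [pvA_loop_general]
    simp only [List.nil_append]
    rw [ih]
    simp only [pvEndsFrom]
    cases h : pvEndsFrom (pos + PySem.Str.len (PySem.Str.replace s " " "")) rest with
    | nil => simp [List.zip]
    | cons e l =>
      simp [List.dropLast_cons_of_ne_nil, List.zip]

-- ===== VERDICT (by name: the statement is the Claim_ definition above) =====
theorem get_sentence_boundaries_spec : Claim_equal_get_sentence_boundaries := by
  intro sentences _
  unfold Spec_get_sentence_boundaries get_sentence_boundaries get_sentence_boundaries_alt pvA_loop pvB_ends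
  rw [pvA_eq_zip]
  simp only [pvB_ends_eq_endsFrom, PySem.List.slice_to_neg_one]
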